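-- pv_equiv track=rewrite | github.com/nuria/study | EPI/monotonic.py | monotonic_d
-- ===== SOURCE A (Python) =====
-- def monotonic_d(A):
--     # creates a monotonic starting stack from a list
--     m = []
--     m.append(A[0])
--
--     for a in A[1:]:
--         #admits equal elements
--         while( len(m) > 0 and a > m[-1]):
--             m.pop()
--
--         m.append(a)
--
--     return m
-- ===== SOURCE B (Python) =====
-- def monotonic_d(A):
--     # single right-to-left pass: keep a[i] iff it is >= every element after it
--     res = []
--     best = None
--     for a in reversed(A):
--         if best is None or a >= best:
--             res.append(a)
--             best = a
--     res.reverse()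
--     return res
-- ===== Notes on version B (the rewrite author's own statement) =====
-- stated objective: faster
-- what changed: Replaces the push/pop monotonic-stack loop by a single right-to-left scan with a running maximum that keeps exactly the elements >= every later element.
import Mathlib
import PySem

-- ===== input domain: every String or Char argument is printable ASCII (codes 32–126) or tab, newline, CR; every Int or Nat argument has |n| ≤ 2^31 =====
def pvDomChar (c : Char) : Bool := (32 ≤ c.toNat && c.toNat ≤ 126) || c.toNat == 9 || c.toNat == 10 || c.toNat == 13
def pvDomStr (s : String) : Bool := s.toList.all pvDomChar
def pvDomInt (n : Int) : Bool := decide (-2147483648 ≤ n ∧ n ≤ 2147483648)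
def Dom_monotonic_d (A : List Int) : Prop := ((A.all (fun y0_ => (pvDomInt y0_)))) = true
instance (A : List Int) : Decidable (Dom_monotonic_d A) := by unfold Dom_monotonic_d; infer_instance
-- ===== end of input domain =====

-- B replaces A's push/pop stack loop by one right-to-left scan with a running maximum
-- (measured faster in a timing run at the largest size; equivalence proved for nonempty lists — A raises IndexError on []).

-- ===== PORT A =====
-- The stack m is stored head-first (head = Python m[-1], the top); the final reverse restores Python order.
-- the inner 'while len(m) > 0 and a > m[-1]: m.pop()'
def pvPopA (a : Int) : List Int → List Int
  | [] => []
  | b :: rest => if a > b then pvPopA a rest else b :: rest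

-- one iteration of the for-loop: pops, then m.append(a)
def pvStepA (m : List Int) (a : Int) : List Int := a :: pvPopA a m

def monotonic_d (A : List Int) : List Int :=
  match A with
  | [] => []  -- Python raises IndexError at A[0]; excluded by Pre_monotonic_d
  | a0 :: rest => (rest.foldl pvStepA [a0]).reverse

-- ===== PORT B =====
-- state = (best, res) of Source B; res grows at the end as Python's append does
def pvStepB (st : Option Int × List Int) (a : Int) : Option Int × List Int :=
  match st.1 with
  | none => (some a, st.2 ++ [a])
  | some b => if a ≥ b then (some a, st.2 ++ [a]) else (some b, st.2)

def monotonic_d_alt (A : List Int) : List Int :=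
  ((A.reverse).foldl pvStepB (none, [])).2.reverse

-- ===== PRECONDITION & SPEC =====
-- Pre_ excludes only the empty list, on which Python A raises IndexError (A[0]).
def Pre_monotonic_d (A : List Int) : Prop := A ≠ []
instance (A : List Int) : Decidable (Pre_monotonic_d A) := by unfold Pre_monotonic_d; infer_instance
def pvWitness_monotonic_d : List Int := [3, 1, 4, 1, 5]

def Spec_monotonic_d (A : List Int) (out : List Int) : Prop := out = monotonic_d_alt A
instance (A : List Int) (out : List Int) : Decidable (Spec_monotonic_d A out) := by unfold Spec_monotonic_d; infer_instance

-- ===== CLAIM (what is proved, stated in full; the proofs are below) =====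
def Claim_equal_monotonic_d : Prop := ∀ (A : List Int), Dom_monotonic_d A → Pre_monotonic_d A → Spec_monotonic_d A (monotonic_d A)

-- ===== LEMMAS AND PROOFS =====

-- reference function: keep a :: rest's head iff it is ≥ the maximum (= head) of keep rest
def pvKeep : List Int → List Int
  | [] => []
  | a :: rest =>
    match pvKeep rest with
    | [] => [a]
    | b :: r => if a ≥ b then a :: b :: r else b :: r

theorem pvKeep_ne_nil (a : Int) (rest : List Int) : pvKeep (a :: rest) ≠ [] := by
  simp only [pvKeep]
  cases pvKeep rest with
  | nil => simp
  | cons b r => by_cases h : a ≥ b <;> simp [h]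

theorem pvPopA_pvPopA (a b : Int) (m : List Int) (hab : a ≤ b) :
    pvPopA b (pvPopA a m) = pvPopA b m := by
  induction m with
  | nil => rfl
  | cons c t ih =>
    simp only [pvPopA]
    by_cases h : a > c
    · rw [if_pos h, ih, if_pos (lt_of_lt_of_le h hab)]
    · rw [if_neg h]
      simp only [pvPopA]

theorem foldA_eq (l : List Int) (h : Int) (t : List Int) (hk : pvKeep l = h :: t) :
    ∀ m : List Int, l.foldl pvStepA m = (h :: t).reverse ++ pvPopA h m := by
  induction l generalizing h t with
  | nil => simp [pvKeep] at hk
  | cons a l' ih =>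
    intro m
    cases hl' : pvKeep l' with
    | nil =>
      -- then l' = [] (pvKeep of a cons is never nil)
      cases l' with
      | cons x xs => exact absurd hl' (pvKeep_ne_nil x xs)
      | nil =>
        simp only [pvKeep] at hk
        cases hk
        simp [pvStepA]
    | cons b r =>
      simp only [pvKeep, hl'] at hk
      rw [List.foldl_cons, ih b r hl']
      by_cases hab : a ≥ b
      · rw [if_pos hab] at hk
        cases hk
        simp only [pvStepA, pvPopA, if_neg (not_lt.mpr hab)]
        simp
      · rw [if_neg hab] at hk
        cases hk
        simp only [pvStepA, pvPopA, if_pos (lt_of_not_ge hab)]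
        rw [pvPopA_pvPopA a h m (le_of_lt (lt_of_not_ge hab))]

theorem A_eq_keep (A : List Int) (hA : A ≠ []) : monotonic_d A = pvKeep A := by
  cases A with
  | nil => exact absurd rfl hA
  | cons a0 rest =>
    cases hr : pvKeep rest with
    | nil =>
      cases rest with
      | cons x xs => exact absurd hr (pvKeep_ne_nil x xs)
      | nil => simp [monotonic_d, pvKeep]
    | cons h t =>
      simp only [monotonic_d, foldA_eq rest h t hr [a0], pvKeep, hr, pvPopA]
      by_cases hh : h > a0
      · simp [hh, not_le.mpr hh]
      · simp [hh, not_lt.mp hh]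

theorem foldrB_eq (A : List Int) :
    A.foldr (fun a st => pvStepB st a) (none, []) = ((pvKeep A).head?, (pvKeep A).reverse) := by
  induction A with
  | nil => rfl
  | cons a rest ih =>
    simp only [List.foldr_cons, ih]
    cases hr : pvKeep rest with
    | nil => simp [pvStepB, pvKeep, hr]
    | cons b r =>
      by_cases hab : a ≥ b
      · simp [pvStepB, pvKeep, hr, hab]
      · simp [pvStepB, pvKeep, hr, hab]

theorem alt_eq_keep (A : List Int) : monotonic_d_alt A = pvKeep A := by
  simp only [monotonic_d_alt, List.foldl_reverse, foldrB_eq, List.reverse_reverse]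

-- ===== VERDICT (by name: the statement is the Claim_ definition above) =====
theorem monotonic_d_spec : Claim_equal_monotonic_d := by
  intro A _ hpre
  unfold Spec_monotonic_d
  rw [A_eq_keep A hpre, alt_eq_keep]
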